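-- pv_equiv track=rewrite | github.com/proman3419/AGH-WIET-INF-ASD-2021 | others/kol1_15_16/zad1.py | generate_sums
-- ===== SOURCE A (Python) =====
-- def generate_sums(A, n):
--   sums = [None]*n # O(n)
--   for i in range(n): # O(n)
--     _sum = 0
--     for j in range(i*n, (i+1)*n): # O(n)
--       _sum += A[j]
--     sums[i] = (i*n, (i+1)*n, _sum)
--
--   return sums
-- ===== SOURCE B (Python) =====
-- def generate_sums(A, n):
--     # prefix-sum approach: P[k] = sum of A[:k]; each block sum is a difference of prefixes
--     P = [0]
--     acc = 0
--     for x in A: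
--         acc += x
--         P.append(acc)
--     return [(i * n, (i + 1) * n, P[(i + 1) * n] - P[i * n]) for i in range(n)]
-- ===== Notes on version B (the rewrite author's own statement) =====
-- stated objective: alternative
-- what changed: Replaces the nested per-block summation loops by a single prefix-sum pass over A, after which each block sum is the difference of two prefix sums.
import Mathlib
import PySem

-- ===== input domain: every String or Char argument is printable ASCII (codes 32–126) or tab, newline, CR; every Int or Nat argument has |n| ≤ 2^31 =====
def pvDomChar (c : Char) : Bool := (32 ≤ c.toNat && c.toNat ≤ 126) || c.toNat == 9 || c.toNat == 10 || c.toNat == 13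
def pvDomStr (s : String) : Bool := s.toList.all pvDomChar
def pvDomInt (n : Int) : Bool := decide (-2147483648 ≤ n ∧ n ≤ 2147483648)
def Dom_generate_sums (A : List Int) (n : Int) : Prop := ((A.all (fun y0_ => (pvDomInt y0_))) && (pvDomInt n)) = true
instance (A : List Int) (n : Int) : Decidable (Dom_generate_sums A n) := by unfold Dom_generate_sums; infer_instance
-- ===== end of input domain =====

-- B replaces the per-block inner summation loop by a single prefix-sum pass over A,
-- each block sum becoming a difference of two prefix sums (objective: alternative).

-- ===== PORT A =====
def generate_sums (A : List Int) (n : Int) : List (Int × Int × Int) :=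
  (PySem.List.pyRange 0 n 1).foldl (fun sums i =>
    sums ++ [(i * n, (i + 1) * n,
      (PySem.List.pyRange (i * n) ((i + 1) * n) 1).foldl
        (fun s j => s + PySem.List.pyGetD A j 0) 0)]) []

-- ===== PORT B =====
def generate_sums_alt (A : List Int) (n : Int) : List (Int × Int × Int) :=
  let st := A.foldl (fun (st : List Int × Int) x => (st.1 ++ [st.2 + x], st.2 + x)) ([0], 0)
  (PySem.List.pyRange 0 n 1).map (fun i =>
    (i * n, (i + 1) * n,
      PySem.List.pyGetD st.1 ((i + 1) * n) 0 - PySem.List.pyGetD st.1 (i * n) 0))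

-- ===== PRECONDITION & SPEC =====
-- Pre_ excludes exactly the inputs on which A raises IndexError (0 < n with fewer than n*n elements).
def Pre_generate_sums (A : List Int) (n : Int) : Prop := n ≤ 0 ∨ n * n ≤ (A.length : Int)
instance (A : List Int) (n : Int) : Decidable (Pre_generate_sums A n) := by
  unfold Pre_generate_sums; infer_instance
def pvWitness_generate_sums : List Int × Int := ([1, 2, 3, 4], 2)

def Spec_generate_sums (A : List Int) (n : Int) (out : List (Int × Int × Int)) : Prop := out = generate_sums_alt A n
instance (A : List Int) (n : Int) (out : List (Int × Int × Int)) : Decidable (Spec_generate_sums A n out) := by unfold Spec_generate_sums; infer_instance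

-- ===== CLAIM (what is proved, stated in full; the proofs are below) =====
def Claim_equal_generate_sums : Prop := ∀ (A : List Int) (n : Int), Dom_generate_sums A n → Pre_generate_sums A n → Spec_generate_sums A n (generate_sums A n)

-- ===== LEMMAS AND PROOFS =====

-- the list of partial sums s+x1, s+x1+x2, … produced by B's first loop
def psums : Int → List Int → List Int
  | _, [] => []
  | s, x :: t => (s + x) :: psums (s + x) t

theorem foldl_psums (A : List Int) (acc : List Int) (s : Int) :
    A.foldl (fun (st : List Int × Int) x => (st.1 ++ [st.2 + x], st.2 + x)) (acc, s)
      = (acc ++ psums s A, s + A.sum) := by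
  induction A generalizing acc s with
  | nil => simp [psums]
  | cons x t ih =>
    simp only [List.foldl_cons, ih, psums, List.sum_cons]
    refine Prod.ext ?_ ?_
    · simp
    · simp; ring

theorem psums_getD (A : List Int) (s : Int) (k : Nat) (hk : k ≤ A.length) :
    (s :: psums s A).getD k 0 = s + ((A.take k).sum) := by
  induction A generalizing s k with
  | nil =>
    have : k = 0 := by simpa using hk
    subst this; simp
  | cons x t ih =>
    cases k with
    | zero => simp
    | succ k =>
      simp only [psums, List.getD_cons_succ]
      rw [ih (s + x) k (by simpa using hk)]
      simp [List.sum_cons]; ring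

theorem prefix_getD (A : List Int) (b : Int) (h0 : 0 ≤ b) (hb : b ≤ (A.length : Int)) :
    PySem.List.pyGetD ((0 : Int) :: psums 0 A) b 0 = (A.take b.toNat).sum := by
  rw [PySem.List.pyGetD_of_nonneg _ _ h0]
  rw [psums_getD A 0 b.toNat (by omega)]
  ring

theorem block_map (A : List Int) (a b : Int) (ha : 0 ≤ a) (hab : a ≤ b)
    (hb : b ≤ (A.length : Int)) :
    (PySem.List.pyRange a b 1).map (fun j => PySem.List.pyGetD A j 0)
      = (A.take b.toNat).drop a.toNat := by
  have hlen : ((A.take b.toNat).length : Int) = b := by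
    simp [List.length_take]; omega
  have h1 : (PySem.List.pyRange a b 1).map (fun j => PySem.List.pyGetD A j 0)
      = (PySem.List.pyRange a b 1).map (fun j => PySem.List.pyGetD (A.take b.toNat) j 0) := by
    apply List.map_congr_left
    intro j hj
    rw [PySem.List.mem_pyRange_one] at hj
    rw [PySem.List.pyGetD_eq_getElem _ _ (by omega) (by omega),
        PySem.List.pyGetD_eq_getElem _ _ (by omega) (by rw [hlen]; omega)]
    rw [List.getElem_take]
  rw [h1]
  obtain ⟨T, hT⟩ : ∃ T, A.take b.toNat = T := ⟨_, rfl⟩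
  rw [hT] at hlen ⊢
  rw [← hlen]
  exact PySem.List.map_pyGetD_pyRange' T 0 ha

theorem take_sum_split (A : List Int) (a b : Nat) (hab : a ≤ b) :
    ((A.take b).drop a).sum = (A.take b).sum - (A.take a).sum := by
  have h := List.take_append_drop a (A.take b)
  have h2 : (A.take b).take a = A.take a := by
    rw [List.take_take, Nat.min_eq_left hab]
  have h3 : (A.take b).sum = ((A.take b).take a).sum + ((A.take b).drop a).sum := by
    conv_lhs => rw [← h]
    rw [List.sum_append]
  rw [h2] at h3
  omega

theorem generate_sums_spec' (A : List Int) (n : Int) (hpre : Pre_generate_sums A n) :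
    generate_sums A n = generate_sums_alt A n := by
  unfold generate_sums generate_sums_alt
  rcases hpre with hn | hpre
  · rw [PySem.List.pyRange_one_eq_nil (by omega)]
    simp
  · have hP := foldl_psums A [0] 0
    simp only [hP]
    rw [PySem.List.foldl_append_singleton_eq_map]
    simp only [List.nil_append, List.cons_append]
    apply List.map_congr_left
    intro i hi
    rw [PySem.List.mem_pyRange_one] at hi
    have h0n : 0 < n := by
      rcases lt_trichotomy n 0 with h | h | h <;> nlinarith [hi.1, hi.2]
    have ha : 0 ≤ i * n := mul_nonneg hi.1 (le_of_lt h0n)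
    have hab : i * n ≤ (i + 1) * n := by nlinarith
    have hb : (i + 1) * n ≤ (A.length : Int) := by nlinarith [hi.2]
    have habn : (i * n).toNat ≤ ((i + 1) * n).toNat := by omega
    refine congrArg (fun s => (i * n, (i + 1) * n, s)) ?_
    rw [PySem.List.foldl_add (g := fun j => PySem.List.pyGetD A j 0)]
    rw [block_map A (i * n) ((i + 1) * n) ha hab hb]
    rw [take_sum_split A _ _ habn]
    rw [prefix_getD A _ (by omega) hb, prefix_getD A _ ha (le_trans hab hb)]
    ring

-- ===== VERDICT (by name: the statement is the Claim_ definition above) =====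
theorem generate_sums_spec : Claim_equal_generate_sums := by
  intro A n _ hpre
  unfold Spec_generate_sums
  exact generate_sums_spec' A n hpre
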